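-- pv_equiv track=rewrite | github.com/vigneshSrinivasan2005/IntermittentML | pre-processing/intermittent_products.py | compute_time_since_last_sale
-- ===== SOURCE A (Python) =====
-- def compute_time_since_last_sale(daily_sales: list[int]) -> list[int]:
-- 	time_since_last_sale: list[int] = []
-- 	last_sale_index = -1
--
-- 	for index, sale_value in enumerate(daily_sales):
-- 		if last_sale_index == -1:
-- 			time_since_last_sale.append(-1)
-- 		else:
-- 			time_since_last_sale.append(index - last_sale_index)
--
-- 		if sale_value > 0:
-- 			last_sale_index = index
--
-- 	return time_since_last_sale
-- ===== SOURCE B (Python) =====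
-- def compute_time_since_last_sale(daily_sales: list[int]) -> list[int]:
--     n = len(daily_sales)
--     pos = [i for i, s in enumerate(daily_sales) if s > 0]
--     if not pos:
--         return [-1] * n
--     out = [-1] * (pos[0] + 1)
--     for p, q in zip(pos, pos[1:]):
--         out.extend(range(1, q - p + 1))
--     out.extend(range(1, n - pos[-1]))
--     return out
-- ===== Notes on version B (the rewrite author's own statement) =====
-- stated objective: alternative
-- what changed: B is a two-stage construction: it first collects the indices of positive-sale days, then assembles the answer as a block of -1s plus an arithmetic run (range) per inter-sale segment, instead of A's single per-day scan carrying the last sale index.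
import Mathlib
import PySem

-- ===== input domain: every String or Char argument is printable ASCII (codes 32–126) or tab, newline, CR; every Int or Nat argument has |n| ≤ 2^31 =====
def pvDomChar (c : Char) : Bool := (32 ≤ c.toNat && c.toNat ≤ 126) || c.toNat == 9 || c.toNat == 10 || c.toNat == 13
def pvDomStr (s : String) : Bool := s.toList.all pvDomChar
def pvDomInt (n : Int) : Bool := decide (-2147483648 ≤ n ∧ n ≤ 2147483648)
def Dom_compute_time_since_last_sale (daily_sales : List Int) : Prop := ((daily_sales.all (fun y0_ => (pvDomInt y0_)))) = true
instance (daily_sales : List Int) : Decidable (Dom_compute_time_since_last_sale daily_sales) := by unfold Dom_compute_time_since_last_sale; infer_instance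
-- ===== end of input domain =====

-- B replaces A's single per-day scan (carrying the last sale's index) by a two-stage build:
-- collect positive-sale indices, then concatenate a -1 block and one arithmetic range per segment.

-- ===== PORT A =====
-- loop over (index, sale_value) pairs carrying last_sale_index; append then update, as in A
def computeA (rest : List Int) (index last_sale_index : Int) : List Int :=
  match rest with
  | [] => []
  | sale_value :: rest' =>
    (if last_sale_index = -1 then (-1 : Int) else index - last_sale_index)
      :: computeA rest' (index + 1) (if sale_value > 0 then index else last_sale_index)

def compute_time_since_last_sale (daily_sales : List Int) : List Int :=
  computeA daily_sales 0 (-1)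

-- ===== PORT B =====
-- the comprehension [i for i, s in enumerate(daily_sales) if s > 0]
def posFromB (xs : List Int) (i : Int) : List Int :=
  match xs with
  | [] => []
  | s :: rest => if s > 0 then i :: posFromB rest (i + 1) else posFromB rest (i + 1)

-- the loop 'for p, q in zip(pos, pos[1:]): out.extend(range(1, q - p + 1))'
def gapsB : List Int → List Int
  | p :: q :: rest => PySem.List.pyRange 1 (q - p + 1) 1 ++ gapsB (q :: rest)
  | _ => []

-- pos[-1]
def lastPosB (p : Int) : List Int → Int
  | [] => p
  | q :: rest => lastPosB q rest

def compute_time_since_last_sale_alt (daily_sales : List Int) : List Int :=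
  let n : Int := daily_sales.length
  match posFromB daily_sales 0 with
  | [] => List.replicate daily_sales.length (-1)
  | p0 :: rest =>
    List.replicate (p0 + 1).toNat (-1) ++ (gapsB (p0 :: rest)
      ++ PySem.List.pyRange 1 (n - lastPosB p0 rest) 1)

-- ===== PRECONDITION & SPEC =====
def Spec_compute_time_since_last_sale (daily_sales : List Int) (out : List Int) : Prop := out = compute_time_since_last_sale_alt daily_sales
instance (daily_sales : List Int) (out : List Int) : Decidable (Spec_compute_time_since_last_sale daily_sales out) := by unfold Spec_compute_time_since_last_sale; infer_instance

-- ===== CLAIM =====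
def Claim_equal_compute_time_since_last_sale : Prop := ∀ (daily_sales : List Int), Dom_compute_time_since_last_sale daily_sales → Spec_compute_time_since_last_sale daily_sales (compute_time_since_last_sale daily_sales)

-- ===== LEMMAS AND PROOFS =====

-- every index collected by posFromB starting at i is ≥ i
theorem posFromB_ge (xs : List Int) (i : Int) :
    ∀ q ∈ posFromB xs i, i ≤ q := by
  induction xs generalizing i with
  | nil => intro q h; simp [posFromB] at h
  | cons s rest ih =>
    intro q h
    simp only [posFromB] at h
    split at h
    · rcases List.mem_cons.1 h with rfl | h
      · omega
      · have := ih (i + 1) q h; omega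
    · have := ih (i + 1) q h; omega

-- segment view of computeA after the first sale: seg pos i p e
def segV (pos : List Int) (i p e : Int) : List Int :=
  match pos with
  | [] => PySem.List.pyRange (i - p) (e - p) 1
  | q :: qs => PySem.List.pyRange (i - p) (q - p + 1) 1 ++ segV qs (q + 1) q e

theorem computeA_sale (xs : List Int) (i p : Int) (hp0 : 0 ≤ p) (hp : p < i) :
    computeA xs i p = segV (posFromB xs i) i p (i + xs.length) := by
  induction xs generalizing i p with
  | nil => simp [computeA, posFromB, segV, PySem.List.pyRange_one_eq_nil le_rfl]
  | cons s rest ih =>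
    simp only [computeA, posFromB]
    by_cases hs : s > 0
    · simp only [if_pos hs, segV]
      rw [if_neg (by omega : ¬ p = -1)]
      rw [PySem.List.pyRange_one_cons (by omega : i - p < i - p + 1),
          PySem.List.pyRange_one_eq_nil (by omega : (i:Int) - p + 1 ≤ i - p + 1)]
      simp only [List.cons_append, List.nil_append, List.length_cons]
      refine congrArg _ ?_
      rw [ih (i + 1) i (by omega) (by omega)]
      congr 1
      push_cast; omega
    · simp only [if_neg hs]
      rw [if_neg (by omega : ¬ p = -1)]
      rw [ih (i + 1) p hp0 (by omega)]
      have he : i + ((s :: rest).length : Int) = (i + 1) + rest.length := by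
        simp only [List.length_cons]; push_cast; omega
      rw [he]
      cases hpos : posFromB rest (i + 1) with
      | nil =>
        simp only [segV]
        have hlen : (0:Int) ≤ rest.length := Int.natCast_nonneg _
        have hlt : i - p < i + 1 + (rest.length : Int) - p := by omega
        rw [PySem.List.pyRange_one_cons hlt]
        have h' : i + 1 - p = i - p + 1 := by omega
        rw [h']
      | cons q qs =>
        have hq : i + 1 ≤ q := posFromB_ge rest (i + 1) q (by rw [hpos]; exact List.mem_cons_self)
        simp only [segV]
        have hlt : i - p < q - p + 1 := by omega
        rw [PySem.List.pyRange_one_cons hlt]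
        simp only [List.cons_append]
        have h' : i + 1 - p = i - p + 1 := by omega
        rw [h']

-- bridge: segV in B's shape (gapsB over consecutive pairs plus the final range)
theorem segV_eq_gaps (qs : List Int) (p e : Int) :
    segV qs (p + 1) p e = gapsB (p :: qs) ++ PySem.List.pyRange 1 (e - lastPosB p qs) 1 := by
  induction qs generalizing p with
  | nil =>
    simp only [segV, gapsB, lastPosB, List.nil_append]
    congr 1; omega
  | cons q qs' ih =>
    simp only [segV, gapsB, lastPosB]
    rw [ih q]
    have h1 : p + 1 - p = (1 : Int) := by omega
    rw [h1, List.append_assoc]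

-- the no-sale-yet phase of computeA
theorem computeA_none (xs : List Int) (i : Int) (hi : 0 ≤ i) :
    computeA xs i (-1) =
      match posFromB xs i with
      | [] => List.replicate xs.length (-1)
      | q :: qs => List.replicate (q - i + 1).toNat (-1) ++ segV qs (q + 1) q (i + xs.length) := by
  induction xs generalizing i with
  | nil => simp [computeA, posFromB]
  | cons s rest ih =>
    simp only [computeA, posFromB]
    by_cases hs : s > 0
    · simp only [if_pos hs]
      have h1 : ((i : Int) - i + 1).toNat = 1 := by omega
      rw [computeA_sale rest (i + 1) i hi (by omega)]
      simp only [h1, List.replicate, List.cons_append, List.nil_append]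
      refine congrArg _ ?_
      congr 1
      simp only [List.length_cons]; push_cast; omega
    · simp only [if_neg hs]
      rw [ih (i + 1) (by omega)]
      cases hpos : posFromB rest (i + 1) with
      | nil => simp [List.replicate, List.length_cons]
      | cons q qs =>
        have hq : i + 1 ≤ q := posFromB_ge rest (i + 1) q (by rw [hpos]; exact List.mem_cons_self)
        have h2 : (q - i + 1).toNat = (q - (i + 1) + 1).toNat + 1 := by omega
        simp only [h2, List.replicate_succ, List.cons_append]
        have he : i + ((s :: rest).length : Int) = (i + 1) + rest.length := by
          simp only [List.length_cons]; push_cast; omega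
        rw [he]
        simp

-- ===== VERDICT =====
theorem compute_time_since_last_sale_spec : Claim_equal_compute_time_since_last_sale := by
  intro daily_sales _
  unfold Spec_compute_time_since_last_sale compute_time_since_last_sale compute_time_since_last_sale_alt
  rw [computeA_none daily_sales 0 (by omega)]
  cases hpos : posFromB daily_sales 0 with
  | nil => simp
  | cons p0 rest =>
    have hp0 : 0 ≤ p0 := posFromB_ge daily_sales 0 p0 (by rw [hpos]; exact List.mem_cons_self)
    simp only []
    rw [segV_eq_gaps rest p0 ((0 : Int) + daily_sales.length)]
    have h1 : (p0 - 0 + 1).toNat = (p0 + 1).toNat := by omega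
    have h2 : (0 : Int) + (daily_sales.length : Int) = daily_sales.length := by omega
    rw [h1, h2]
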